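-- pv_equiv track=rewrite | github.com/awwong1/topic-traceability | build_run_eval_lda_models.py | extract_course_texts_mapping
-- ===== SOURCE A (Python) =====
-- def extract_course_texts_mapping(course_vocabulary):
--     mapping = {}
--     course_texts = []
--     for module_name, lessons_vocabulary in course_vocabulary.items():
--         for lesson_name, items_vocabulary in lessons_vocabulary.items():
--             for item_name, document_words in items_vocabulary.items():
--                 if document_words:
--                     module_mapping = mapping.get("modules", {})
--                     module_map_vals = module_mapping.get(module_name, [])
--                     module_map_vals.append(len(course_texts))
--                     module_mapping[module_name] = module_map_vals
--                     mapping["modules"] = module_mapping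
--
--                     lesson_mapping = mapping.get("lessons", {})
--                     lesson_map_vals = lesson_mapping.get(lesson_name, [])
--                     lesson_map_vals.append(len(course_texts))
--                     lesson_mapping[lesson_name] = lesson_map_vals
--                     mapping["lessons"] = lesson_mapping
--
--                     item_mapping = mapping.get("items", {})
--                     item_map_vals = item_mapping.get(item_name, [])
--                     item_map_vals.append(len(course_texts))
--                     item_mapping[item_name] = item_map_vals
--                     mapping["items"] = item_mapping
--
--                     course_texts.append(document_words)
--     return course_texts, mapping
-- ===== SOURCE B (Python) =====
-- def extract_course_texts_mapping(course_vocabulary):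
--     # Pass 1: collect the non-empty documents and their (module, lesson, item) coordinates.
--     course_texts = []
--     coords = []
--     for module_name, lessons_vocabulary in course_vocabulary.items():
--         for lesson_name, items_vocabulary in lessons_vocabulary.items():
--             for item_name, document_words in items_vocabulary.items():
--                 if document_words:
--                     course_texts.append(document_words)
--                     coords.append((module_name, lesson_name, item_name))
--     # Pass 2: group the running indices under each coordinate name.
--     modules, lessons, items = {}, {}, {}
--     for idx, (m, l, i) in enumerate(coords):
--         modules.setdefault(m, []).append(idx)
--         lessons.setdefault(l, []).append(idx)
--         items.setdefault(i, []).append(idx)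
--     mapping = {}
--     if course_texts:
--         mapping = {"modules": modules, "lessons": lessons, "items": items}
--     return course_texts, mapping
-- ===== Notes on version B (the rewrite author's own statement) =====
-- stated objective: simpler
-- what changed: Instead of re-fetching and re-inserting the three nested dicts from the mapping on every non-empty document, B first collects the documents together with a parallel (module, lesson, item) coordinate list in one pass, then groups the running indices under each name with setdefault in a second pass, building the mapping only when some document is non-empty.
import Mathlib
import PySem

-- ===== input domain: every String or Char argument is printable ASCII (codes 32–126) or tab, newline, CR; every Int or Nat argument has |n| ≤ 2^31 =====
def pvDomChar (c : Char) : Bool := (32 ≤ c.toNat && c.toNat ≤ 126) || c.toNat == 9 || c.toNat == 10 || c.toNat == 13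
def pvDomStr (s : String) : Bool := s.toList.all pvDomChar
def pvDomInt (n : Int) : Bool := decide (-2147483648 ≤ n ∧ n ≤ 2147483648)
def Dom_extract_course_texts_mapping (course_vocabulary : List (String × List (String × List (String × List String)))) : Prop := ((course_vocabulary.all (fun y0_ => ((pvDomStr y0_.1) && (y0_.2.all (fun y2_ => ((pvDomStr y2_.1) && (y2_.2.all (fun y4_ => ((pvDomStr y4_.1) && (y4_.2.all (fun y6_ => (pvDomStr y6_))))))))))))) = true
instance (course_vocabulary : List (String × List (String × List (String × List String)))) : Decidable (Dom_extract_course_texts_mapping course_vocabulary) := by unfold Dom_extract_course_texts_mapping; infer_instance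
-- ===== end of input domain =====

-- B replaces A's per-document triple dict-rebuilding with two passes (collect texts+coordinates,
-- then group indices with setdefault); objective: simpler decomposition, no speed claim.

-- ===== PORT A =====
-- loop body of A's innermost `if document_words:` block (one step of the triple loop)
def pvStepA (st : PySem.Dict String (PySem.Dict String (List Int)) × List (List String))
    (q : String × String × String × List String) :
    PySem.Dict String (PySem.Dict String (List Int)) × List (List String) :=
  if q.2.2.2.isEmpty then st else
    let mapping := st.1
    let texts := st.2
    let module_mapping := mapping.getD "modules" PySem.Dict.empty
    let module_map_vals := module_mapping.getD q.1 [] ++ [(texts.length : Int)]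
    let module_mapping := module_mapping.insert q.1 module_map_vals
    let mapping := mapping.insert "modules" module_mapping
    let lesson_mapping := mapping.getD "lessons" PySem.Dict.empty
    let lesson_map_vals := lesson_mapping.getD q.2.1 [] ++ [(texts.length : Int)]
    let lesson_mapping := lesson_mapping.insert q.2.1 lesson_map_vals
    let mapping := mapping.insert "lessons" lesson_mapping
    let item_mapping := mapping.getD "items" PySem.Dict.empty
    let item_map_vals := item_mapping.getD q.2.2.1 [] ++ [(texts.length : Int)]
    let item_mapping := item_mapping.insert q.2.2.1 item_map_vals
    let mapping := mapping.insert "items" item_mapping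
    (mapping, texts ++ [q.2.2.2])

def extract_course_texts_mapping (course_vocabulary : List (String × List (String × List (String × List String)))) : List (List String) × (List (String × List (String × List Int))) :=
  let st := course_vocabulary.foldl (fun st p =>
    p.2.foldl (fun st q =>
      q.2.foldl (fun st r => pvStepA st (p.1, q.1, r.1, r.2)) st) st)
    ((PySem.Dict.empty : PySem.Dict String (PySem.Dict String (List Int))), ([] : List (List String)))
  (st.2, st.1.items.map (fun p => (p.1, p.2.items)))

-- ===== PORT B =====
-- loop body of B's first pass (collect document and coordinate)
def pvStepC (st : List (List String) × List (String × String × String))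
    (q : String × String × String × List String) :
    List (List String) × List (String × String × String) :=
  if q.2.2.2.isEmpty then st else (st.1 ++ [q.2.2.2], st.2 ++ [(q.1, q.2.1, q.2.2.1)])

def extract_course_texts_mapping_alt (course_vocabulary : List (String × List (String × List (String × List String)))) : List (List String) × (List (String × List (String × List Int))) :=
  let tc := course_vocabulary.foldl (fun st p =>
    p.2.foldl (fun st q =>
      q.2.foldl (fun st r => pvStepC st (p.1, q.1, r.1, r.2)) st) st)
    (([] : List (List String)), ([] : List (String × String × String)))
  -- second pass: for idx, (m, l, i) in enumerate(coords): …setdefault(…, []).append(idx)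
  let g := (PySem.List.enumerate tc.2 0).foldl
    (fun (g : PySem.Dict String (List Int) × PySem.Dict String (List Int) × PySem.Dict String (List Int)) ic =>
      (g.1.modify ic.2.1 [] (· ++ [ic.1]),
       g.2.1.modify ic.2.2.1 [] (· ++ [ic.1]),
       g.2.2.modify ic.2.2.2 [] (· ++ [ic.1])))
    (PySem.Dict.empty, PySem.Dict.empty, PySem.Dict.empty)
  let mapping : List (String × List (String × List Int)) :=
    if tc.1.isEmpty then []
    else [("modules", g.1.items), ("lessons", g.2.1.items), ("items", g.2.2.items)]
  (tc.1, mapping)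

-- ===== PRECONDITION & SPEC =====
def Spec_extract_course_texts_mapping (course_vocabulary : List (String × List (String × List (String × List String)))) (out : List (List String) × (List (String × List (String × List Int)))) : Prop := out = extract_course_texts_mapping_alt course_vocabulary
instance (course_vocabulary : List (String × List (String × List (String × List String)))) (out : List (List String) × (List (String × List (String × List Int)))) : Decidable (Spec_extract_course_texts_mapping course_vocabulary out) := by unfold Spec_extract_course_texts_mapping; infer_instance

-- ===== CLAIM (what is proved, stated in full; the proofs are below) =====
def Claim_equal_extract_course_texts_mapping : Prop := ∀ (course_vocabulary : List (String × List (String × List (String × List String)))), Dom_extract_course_texts_mapping course_vocabulary → Spec_extract_course_texts_mapping course_vocabulary (extract_course_texts_mapping course_vocabulary)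

-- ===== LEMMAS AND PROOFS =====

-- the flattened list of (module, lesson, item, words) quadruples, in traversal order
def pvFlat (cv : List (String × List (String × List (String × List String)))) :
    List (String × String × String × List String) :=
  cv.flatMap (fun p => p.2.flatMap (fun q => q.2.map (fun r => (p.1, q.1, r.1, r.2))))

-- both triple-nested loops are folds over the flattened quadruple list
theorem pv_nested_inner {S : Type} (g : S → String × String × String × List String → S) (mn : String) :
    ∀ (ls : List (String × List (String × List String))) (st : S),
    ls.foldl (fun st q => q.2.foldl (fun st r => g st (mn, q.1, r.1, r.2)) st) st
      = (ls.flatMap (fun q => q.2.map (fun r => (mn, q.1, r.1, r.2)))).foldl g st := by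
  intro ls
  induction ls with
  | nil => intro st; rfl
  | cons q ls ih => intro st; simp [List.foldl_append, List.foldl_map, ih]

theorem pv_nested_flat {S : Type} (g : S → String × String × String × List String → S) :
    ∀ (cv : List (String × List (String × List (String × List String)))) (st : S),
    cv.foldl (fun st p => p.2.foldl (fun st q => q.2.foldl (fun st r => g st (p.1, q.1, r.1, r.2)) st) st) st
      = (pvFlat cv).foldl g st := by
  intro cv
  induction cv with
  | nil => intro st; rfl
  | cons p cv ih => intro st; simp [pvFlat, List.foldl_append, ih, pv_nested_inner g p.1 p.2]

def pvTruthy (q : String × String × String × List String) : Bool := !q.2.2.2.isEmpty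
def pvTxts (qs : List (String × String × String × List String)) : List (List String) :=
  (qs.filter pvTruthy).map (·.2.2.2)
def pvCrds (qs : List (String × String × String × List String)) : List (String × String × String) :=
  (qs.filter pvTruthy).map (fun q => (q.1, q.2.1, q.2.2.1))

theorem pv_collect (qs : List (String × String × String × List String)) :
    ∀ (ts : List (List String)) (cs : List (String × String × String)),
    qs.foldl pvStepC (ts, cs) = (ts ++ pvTxts qs, cs ++ pvCrds qs) := by
  induction qs with
  | nil => intro ts cs; simp [pvTxts, pvCrds]
  | cons q qs ih =>
    intro ts cs
    by_cases h : q.2.2.2.isEmpty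
    · simp [List.foldl_cons, pvStepC, h, ih, pvTxts, pvCrds, pvTruthy]
    · simp [List.foldl_cons, pvStepC, h, ih, pvTxts, pvCrds, pvTruthy]

-- the three grouping folds, each from empty
def pvGrpM (e : List (Int × (String × String × String))) : PySem.Dict String (List Int) :=
  e.foldl (fun d p => d.modify p.2.1 [] (· ++ [p.1])) PySem.Dict.empty
def pvGrpL (e : List (Int × (String × String × String))) : PySem.Dict String (List Int) :=
  e.foldl (fun d p => d.modify p.2.2.1 [] (· ++ [p.1])) PySem.Dict.empty
def pvGrpI (e : List (Int × (String × String × String))) : PySem.Dict String (List Int) :=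
  e.foldl (fun d p => d.modify p.2.2.2 [] (· ++ [p.1])) PySem.Dict.empty

-- B's simultaneous fold splits componentwise
theorem pv_trip (e : List (Int × (String × String × String))) :
    ∀ d1 d2 d3,
    e.foldl (fun (g : PySem.Dict String (List Int) × PySem.Dict String (List Int) × PySem.Dict String (List Int)) ic =>
      (g.1.modify ic.2.1 [] (· ++ [ic.1]),
       g.2.1.modify ic.2.2.1 [] (· ++ [ic.1]),
       g.2.2.modify ic.2.2.2 [] (· ++ [ic.1]))) (d1, d2, d3)
    = (e.foldl (fun d p => d.modify p.2.1 [] (· ++ [p.1])) d1,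
       e.foldl (fun d p => d.modify p.2.2.1 [] (· ++ [p.1])) d2,
       e.foldl (fun d p => d.modify p.2.2.2 [] (· ++ [p.1])) d3) := by
  induction e with
  | nil => intro d1 d2 d3; rfl
  | cons x e ih => intro d1 d2 d3; simp [List.foldl_cons, ih]

-- A's running mapping, characterised by the enumerated coordinates processed so far
def pvMapOf (e : List (Int × (String × String × String))) :
    PySem.Dict String (PySem.Dict String (List Int)) :=
  if e = [] then PySem.Dict.empty
  else ((PySem.Dict.empty.insert "modules" (pvGrpM e)).insert "lessons" (pvGrpL e)).insert "items" (pvGrpI e)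

theorem pv_stepA (e : List (Int × (String × String × String))) (ts : List (List String))
    (q : String × String × String × List String) (h : q.2.2.2.isEmpty = false) :
    pvStepA (pvMapOf e, ts) q
      = (pvMapOf (e ++ [((ts.length : Int), (q.1, q.2.1, q.2.2.1))]), ts ++ [q.2.2.2]) := by
  have hGM : pvGrpM (e ++ [((ts.length : Int), (q.1, q.2.1, q.2.2.1))])
      = (pvGrpM e).modify q.1 [] (· ++ [(ts.length : Int)]) := by
    simp [pvGrpM, List.foldl_append]
  have hGL : pvGrpL (e ++ [((ts.length : Int), (q.1, q.2.1, q.2.2.1))])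
      = (pvGrpL e).modify q.2.1 [] (· ++ [(ts.length : Int)]) := by
    simp [pvGrpL, List.foldl_append]
  have hGI : pvGrpI (e ++ [((ts.length : Int), (q.1, q.2.1, q.2.2.1))])
      = (pvGrpI e).modify q.2.2.1 [] (· ++ [(ts.length : Int)]) := by
    simp [pvGrpI, List.foldl_append]
  rcases e with _ | ⟨x, e'⟩
  · simp only [pvStepA, h, Bool.false_eq_true, if_false]
    rfl
  · simp only [pvMapOf, if_neg (by simp : ¬(x :: e' = [])),
      if_neg (by simp : ¬(x :: e' ++ [((ts.length : Int), (q.1, q.2.1, q.2.2.1))] = []))]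
    simp only [pvStepA, h, Bool.false_eq_true, if_false]
    rw [hGM, hGL, hGI]
    rfl

theorem pv_loopA (qs : List (String × String × String × List String)) :
    ∀ (e : List (Int × (String × String × String))) (ts : List (List String)),
    qs.foldl pvStepA (pvMapOf e, ts)
      = (pvMapOf (e ++ PySem.List.enumerate (pvCrds qs) (ts.length : Int)), ts ++ pvTxts qs) := by
  induction qs with
  | nil => intro e ts; simp [pvTxts, pvCrds, PySem.List.enumerate_nil]
  | cons q qs ih =>
    intro e ts
    by_cases h : q.2.2.2.isEmpty
    · have : pvStepA (pvMapOf e, ts) q = (pvMapOf e, ts) := by simp [pvStepA, h]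
      simp [List.foldl_cons, this, ih, pvTxts, pvCrds, pvTruthy, h]
    · rw [List.foldl_cons, pv_stepA e ts q (by simpa using h), ih]
      have hcr : pvCrds (q :: qs) = (q.1, q.2.1, q.2.2.1) :: pvCrds qs := by
        simp [pvCrds, pvTruthy, h]
      have htx : pvTxts (q :: qs) = q.2.2.2 :: pvTxts qs := by
        simp [pvTxts, pvTruthy, h]
      have hlen : (((ts ++ [q.2.2.2]).length : Nat) : Int) = (ts.length : Int) + 1 := by
        simp
      rw [hcr, htx, PySem.List.enumerate_cons, hlen]
      simp [List.append_assoc]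

-- length/emptiness transfer between the two filtered projections
theorem pv_txts_nil_iff (qs : List (String × String × String × List String)) :
    pvTxts qs = [] ↔ pvCrds qs = [] := by
  simp [pvTxts, pvCrds]

-- ===== VERDICT (by name: the statement is the Claim_ definition above) =====
theorem extract_course_texts_mapping_spec : Claim_equal_extract_course_texts_mapping := by
  intro cv _
  unfold Spec_extract_course_texts_mapping
  unfold extract_course_texts_mapping extract_course_texts_mapping_alt
  rw [pv_nested_flat pvStepA, pv_nested_flat pvStepC]
  rw [pv_collect (pvFlat cv) [] []]
  have hA := pv_loopA (pvFlat cv) [] []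
  have h0 : pvMapOf [] = PySem.Dict.empty := rfl
  rw [h0] at hA
  simp only [List.length_nil, Nat.cast_zero, List.nil_append] at hA
  rw [hA]
  simp only [List.nil_append]
  rw [pv_trip]
  rcases hts : pvTxts (pvFlat cv) with _ | ⟨t, ts'⟩
  · have hcs : pvCrds (pvFlat cv) = [] := (pv_txts_nil_iff _).mp hts
    simp [hcs, pvMapOf, PySem.List.enumerate_nil]
    rfl
  · have hcs : pvCrds (pvFlat cv) ≠ [] := by
      intro hc
      rw [← pv_txts_nil_iff] at hc
      simp [hts] at hc
    rcases hcse : pvCrds (pvFlat cv) with _ | ⟨c, cs'⟩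
    · exact absurd hcse hcs
    · rw [PySem.List.enumerate_cons]
      simp only [pvMapOf]
      rw [if_neg (by simp)]
      simp [pvGrpM, pvGrpL, pvGrpI]
      rfl
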